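-- pv_equiv track=rewrite | github.com/DariMasureva/SoftUni_projects | fundamentals_solutions/destination_manager.py | separate_destinations
-- ===== SOURCE A (Python) =====
-- def separate_destinations(string_given):
--     first_equal_found = False
--     first_slash_found = False
--     destination_list = []
--     cur_destination = ""
--
--     for symbol in string_given:
--
--         if (first_slash_found and symbol != "/") or (first_equal_found and symbol != "="):
--             cur_destination += symbol
--
--         if symbol == "=" and not first_equal_found and not first_slash_found:
--             first_equal_found = True
--         elif symbol == "=" and first_equal_found and cur_destination:
--             first_equal_found = False
--             destination_list.append(cur_destination)
--             cur_destination = ""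
--
--         elif symbol == "/" and not first_slash_found and not first_equal_found:
--             first_slash_found = True
--         elif symbol == "/" and first_slash_found and cur_destination:
--             first_slash_found = False
--             destination_list.append(cur_destination)
--             cur_destination = ""
--
--     return destination_list
-- ===== SOURCE B (Python) =====
-- def separate_destinations(string_given):
--     result = []
--     s = string_given
--     while s:
--         c = s[0]
--         if c != '=' and c != '/':
--             s = s[1:]
--             continue
--         rest = s.lstrip(c)
--         close = rest.find(c)
--         if close == -1:
--             break
--         result.append(rest[:close])
--         s = rest[close + 1:]
--     return result
-- ===== Notes on version B (the rewrite author's own statement) =====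
-- stated objective: alternative
-- what changed: Replaces the per-character boolean state machine (two flags plus a growing buffer, appended symbol by symbol) with a suffix-driven scan that, at each delimiter, strips the run of equal delimiters with lstrip, locates the closing delimiter with find, and emits the slice between them in one step.
import Mathlib
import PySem

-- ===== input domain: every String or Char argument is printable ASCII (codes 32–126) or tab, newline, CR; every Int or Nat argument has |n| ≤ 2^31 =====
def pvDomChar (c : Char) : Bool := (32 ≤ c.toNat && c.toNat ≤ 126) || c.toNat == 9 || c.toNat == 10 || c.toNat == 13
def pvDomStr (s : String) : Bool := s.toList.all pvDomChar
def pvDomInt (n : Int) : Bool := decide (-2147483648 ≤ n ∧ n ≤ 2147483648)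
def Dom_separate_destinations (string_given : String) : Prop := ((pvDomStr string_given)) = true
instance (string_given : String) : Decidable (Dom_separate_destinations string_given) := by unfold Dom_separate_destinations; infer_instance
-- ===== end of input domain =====

-- B replaces A's per-character boolean state machine by a suffix-driven scan using
-- lstrip/find/slicing (objective: alternative decomposition; no speed claim).

-- ===== PORT A =====
-- fold state = (first_equal_found, first_slash_found, destination_list, cur_destination as List Char)
def sdStepA (st : Bool × Bool × List String × List Char) (symbol : Char) :
    Bool × Bool × List String × List Char :=
  let e := st.1
  let s := st.2.1
  let lst := st.2.2.1
  let cur := st.2.2.2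
  -- if (first_slash_found and symbol != "/") or (first_equal_found and symbol != "="): cur += symbol
  let cur1 := if (s = true ∧ symbol ≠ '/') ∨ (e = true ∧ symbol ≠ '=') then cur ++ [symbol] else cur
  -- the if/elif chain, in A's order
  if symbol = '=' ∧ e = false ∧ s = false then (true, s, lst, cur1)
  else if symbol = '=' ∧ e = true ∧ cur1 ≠ [] then (false, s, lst ++ [String.ofList cur1], [])
  else if symbol = '/' ∧ s = false ∧ e = false then (e, true, lst, cur1)
  else if symbol = '/' ∧ s = true ∧ cur1 ≠ [] then (e, false, lst ++ [String.ofList cur1], [])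
  else (e, s, lst, cur1)

def separate_destinations (string_given : String) : List String :=
  (string_given.toList.foldl sdStepA (false, false, ([] : List String), ([] : List Char))).2.2.1

-- ===== PORT B =====
-- Source B's while-loop over the remaining suffix s: test s[0], s.lstrip(c), rest.find(c),
-- append rest[:close], continue at rest[close+1:]; ported as recursion on the suffix (List Char).
def sdLoopB : List Char → List String → List String
  | [], acc => acc
  | (c :: t), acc =>
    if c ≠ '=' ∧ c ≠ '/' then
      sdLoopB t acc                                        -- s = s[1:]
    else
      let rest := t.dropWhile (· = c)                      -- rest = s.lstrip(c)
      match rest.findIdx? (· = c) with                     -- close = rest.find(c)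
      | none => acc                                        -- close == -1: break
      | some close =>
          sdLoopB (rest.drop (close + 1))                  -- s = rest[close+1:]
                  (acc ++ [String.ofList (rest.take close)])   -- result.append(rest[:close])
  termination_by l _ => l.length
  decreasing_by
    all_goals
      have h1 : (t.dropWhile (· = c)).length ≤ t.length := List.length_dropWhile_le _ _
      simp [List.length_drop] <;> omega

def separate_destinations_alt (string_given : String) : List String :=
  sdLoopB string_given.toList []

-- ===== PRECONDITION & SPEC =====
def Spec_separate_destinations (string_given : String) (out : List String) : Prop := out = separate_destinations_alt string_given
instance (string_given : String) (out : List String) : Decidable (Spec_separate_destinations string_given out) := by unfold Spec_separate_destinations; infer_instance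

-- ===== CLAIM (what is proved, stated in full; the proofs are below) =====
def Claim_equal_separate_destinations : Prop := ∀ (string_given : String), Dom_separate_destinations string_given → Spec_separate_destinations string_given (separate_destinations string_given)

-- ===== LEMMAS AND PROOFS =====

-- result of A's fold started in an arbitrary state
def sdRunA (l : List Char) (e s : Bool) (acc : List String) (cur : List Char) : List String :=
  (l.foldl sdStepA (e, s, acc, cur)).2.2.1

-- A, open on delimiter c with NON-EMPTY buffer: appends every non-c char, emits at the
-- first c, then continues neutrally.
theorem sdRunA_open_nonempty (c : Char) (hc : c = '=' ∨ c = '/') :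
    ∀ (l : List Char) (acc : List String) (cur : List Char), cur ≠ [] →
    sdRunA l (c = '=' : Bool) (c = '/' : Bool) acc cur =
      match l.findIdx? (· = c) with
      | none => acc
      | some j => sdRunA (l.drop (j + 1)) false false (acc ++ [String.ofList (cur ++ l.take j)]) [] := by
  intro l
  induction l with
  | nil => intro acc cur hcur; simp [sdRunA, List.findIdx?_nil]
  | cons a t ih =>
    intro acc cur hcur
    by_cases ha : a = c
    · subst ha
      rcases hc with h | h <;> subst h <;>
        simp [sdRunA, List.foldl_cons, sdStepA, hcur, List.findIdx?_cons]
    · have step : sdStepA ((c = '=' : Bool), (c = '/' : Bool), acc, cur) a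
          = ((c = '=' : Bool), (c = '/' : Bool), acc, cur ++ [a]) := by
        rcases hc with h | h <;> subst h <;> simp [sdStepA, ha]
      have := ih acc (cur ++ [a]) (by simp)
      simp only [sdRunA, List.foldl_cons, step] at *
      rw [this]
      have hfa : ((a :: t).findIdx? (· = c)) = (t.findIdx? (· = c)).map (· + 1) := by
        simp [List.findIdx?_cons, ha]
      rw [hfa]
      cases hft : t.findIdx? (· = c) with
      | none => simp
      | some j => simp [List.take_succ_cons, List.drop_succ_cons]

-- A, open on delimiter c with EMPTY buffer: skips the run of c, then as above.
theorem sdRunA_open_empty (c : Char) (hc : c = '=' ∨ c = '/') :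
    ∀ (l : List Char) (acc : List String),
    sdRunA l (c = '=' : Bool) (c = '/' : Bool) acc [] =
      match (l.dropWhile (· = c)).findIdx? (· = c) with
      | none => acc
      | some j => sdRunA ((l.dropWhile (· = c)).drop (j + 1)) false false
                    (acc ++ [String.ofList ((l.dropWhile (· = c)).take j)]) [] := by
  intro l
  induction l with
  | nil => intro acc; simp [sdRunA, List.findIdx?_nil]
  | cons a t ih =>
    intro acc
    by_cases ha : a = c
    · subst ha
      have step : sdStepA ((a = '=' : Bool), (a = '/' : Bool), acc, []) a
          = ((a = '=' : Bool), (a = '/' : Bool), acc, []) := by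
        rcases hc with h | h <;> subst h <;> simp [sdStepA]
      have hd : (a :: t).dropWhile (· = a) = t.dropWhile (· = a) := by
        simp
      simp only [sdRunA, List.foldl_cons, step, hd] at *
      exact ih acc
    · have step : sdStepA ((c = '=' : Bool), (c = '/' : Bool), acc, []) a
          = ((c = '=' : Bool), (c = '/' : Bool), acc, [a]) := by
        rcases hc with h | h <;> subst h <;> simp [sdStepA, ha]
      have hd : (a :: t).dropWhile (· = c) = a :: t := by
        simp [ha]
      have hmain := sdRunA_open_nonempty c hc t acc [a] (by simp)
      simp only [sdRunA, List.foldl_cons, step, hd] at *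
      rw [hmain]
      have hfa : ((a :: t).findIdx? (· = c)) = (t.findIdx? (· = c)).map (· + 1) := by
        simp [List.findIdx?_cons, ha]
      rw [hfa]
      cases hft : t.findIdx? (· = c) with
      | none => simp
      | some j => simp [List.take_succ_cons, List.drop_succ_cons]

-- A started in the neutral state equals B's suffix loop.
theorem sdRunA_neutral : ∀ (n : Nat) (l : List Char), l.length ≤ n →
    ∀ (acc : List String), sdRunA l false false acc [] = sdLoopB l acc := by
  intro n
  induction n with
  | zero =>
    intro l hl acc
    have : l = [] := List.eq_nil_of_length_eq_zero (Nat.le_zero.mp hl)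
    subst this; simp [sdRunA, sdLoopB]
  | succ n ih =>
    intro l hl acc
    cases l with
    | nil => simp [sdRunA, sdLoopB]
    | cons a t =>
      by_cases ha : a ≠ '=' ∧ a ≠ '/'
      · have step : sdStepA (false, false, acc, []) a = (false, false, acc, []) := by
          simp [sdStepA, ha.1, ha.2]
        rw [sdLoopB]
        rw [if_pos ha]
        simp only [sdRunA, List.foldl_cons, step]
        exact ih t (by simpa using Nat.le_of_succ_le_succ (by simpa using hl)) acc
      · have hc : a = '=' ∨ a = '/' := by tauto
        have step : sdStepA (false, false, acc, []) a
            = ((a = '=' : Bool), (a = '/' : Bool), acc, []) := by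
          rcases hc with h | h <;> subst h <;> simp [sdStepA]
        rw [sdLoopB]
        rw [if_neg ha]
        simp only [sdRunA, List.foldl_cons, step]
        have := sdRunA_open_empty a hc t acc
        simp only [sdRunA] at this
        rw [this]
        have hlt : t.length ≤ n := by simpa using Nat.le_of_succ_le_succ (by simpa using hl)
        cases hft : (t.dropWhile (· = a)).findIdx? (· = a) with
        | none => simp
        | some j =>
          simp only
          apply ih
          have h1 : (t.dropWhile (· = a)).length ≤ t.length := List.length_dropWhile_le _ _
          simp [List.length_drop]; omega

-- ===== VERDICT (by name: the statement is the Claim_ definition above) =====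
theorem separate_destinations_spec : Claim_equal_separate_destinations := by
  intro s _
  unfold Spec_separate_destinations separate_destinations separate_destinations_alt
  exact sdRunA_neutral s.toList.length s.toList (le_refl _) []
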